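-- pv_equiv track=rewrite | github.com/ericmusa-ibm-public/reverse-clip-captions | genetic/__init__.py | trim_incomplete_response
-- ===== SOURCE A (Python) =====
-- import string
--
-- def trim_incomplete_response(
--         response,
--         delimiters=('.', '!', '?'),
--         comma_is_delimiter=False,
--         delim_follows_text=0,
--         include_quotes=True,
--         cutoff_str='...',
--         strip_ws=True,
--         ):
--
--     trimmed = str(response)
--     # copy the response, allowing indexing past the cutoff for the trailing quote
--
--     if not response.endswith(delimiters):
--         # if the response already ends with a delimiter, all good, skip to end and return original response
--
--         assert delim_follows_text < len(response), f'delim_follows_text ({delim_follows_text}) must be '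
--         # `delim_follows_text` must be less than the length of the response
--         # if it were longer, we would attempt to slice the response string past its length
--
--         i = len(response)
--         while i > 0:
--         # now we iterate backwards through the response, doing checks as nec. acc. to the function args
--             i -= 1
--             # decrement first because index of len(response) is out of bounds
--
--             if response[i] in delimiters:
--             # check if this char is in delimiters
--
--                 if delim_follows_text > 0:
--                 # if so, then if we need to also check if preceding characters are text...
--
--                     if not all(char in string.ascii_letters for char in response[i-delim_follows_text:i]):
--                         continue
--                     # then check if the preceding N=`delim_follow_text` characters are letters. if not, skip to next i
--
--                 trimmed = response[:i+1]
--                 break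
--                 # here, the response[i] is a delimiter, its preceding characters are letters (if req.'d)
--                 # set `trimmed`, the output string, to `response` up to and including response[i]
--
--             elif response[i] == ',' and comma_is_delimiter:
--             # if response[i] is not a regular delim character but we want to treat commas as a delimiter...
--
--                 trimmed = response[:i] + cutoff_str
--                 break
--                 # then `trimmed` is set up to But Not Including the "," response[i],
--                 # and the `cutoff_str` is appended to the end
--
--         if include_quotes:
--             # if responses will be sentences in quotes, then we want to add back
--             # quotes immediately following a delimiter that were trimmed off
--             if response[i+1] == "'":
--                 trimmed += "'"
--             elif response[i+1] == "\"":
--                 trimmed += "\""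
--
--         if strip_ws:
--             # strip white space and newline characters
--             trimmed = trimmed.strip()
--
--     return trimmed
-- ===== SOURCE B (Python) =====
-- import string
--
--
-- def trim_incomplete_response(
--         response,
--         delimiters=('.', '!', '?'),
--         comma_is_delimiter=False,
--         delim_follows_text=0,
--         include_quotes=True,
--         cutoff_str='...',
--         strip_ws=True,
--         ):
--     # Staged decomposition: collect the candidate delimiter and comma cut
--     # positions with comprehensions, take each maximum, then build the result.
--     if response.endswith(tuple(delimiters)):
--         return str(response)
--
--     assert delim_follows_text < len(response), f'delim_follows_text ({delim_follows_text}) must be '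
--
--     def letters_before(i):
--         return delim_follows_text <= 0 or all(
--             c in string.ascii_letters
--             for c in response[i - delim_follows_text:i])
--
--     best_d = max((i for i in range(len(response))
--                   if response[i] in delimiters and letters_before(i)),
--                  default=-1)
--     best_c = max((i for i in range(len(response))
--                   if response[i] == ',' and response[i] not in delimiters
--                   and comma_is_delimiter),
--                  default=-1)
--
--     if best_d > best_c:
--         last_i, trimmed = best_d, response[:best_d + 1]
--     elif best_c >= 0:
--         last_i, trimmed = best_c, response[:best_c] + cutoff_str
--     else:
--         last_i, trimmed = 0, str(response)
--
--     if include_quotes: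
--         nxt = response[last_i + 1]
--         if nxt == "'":
--             trimmed += "'"
--         elif nxt == '"':
--             trimmed += '"'
--
--     if strip_ws:
--         trimmed = trimmed.strip()
--
--     return trimmed
-- ===== Notes on version B (the rewrite author's own statement) =====
-- stated objective: alternative
-- what changed: A scans backwards from the end with an early break, building the trimmed string inside the loop; B instead runs two staged comprehension passes collecting delimiter hits and comma hits, takes the maximum index of each (default -1), and picks the cut by comparing the two maxima.
import Mathlib
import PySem

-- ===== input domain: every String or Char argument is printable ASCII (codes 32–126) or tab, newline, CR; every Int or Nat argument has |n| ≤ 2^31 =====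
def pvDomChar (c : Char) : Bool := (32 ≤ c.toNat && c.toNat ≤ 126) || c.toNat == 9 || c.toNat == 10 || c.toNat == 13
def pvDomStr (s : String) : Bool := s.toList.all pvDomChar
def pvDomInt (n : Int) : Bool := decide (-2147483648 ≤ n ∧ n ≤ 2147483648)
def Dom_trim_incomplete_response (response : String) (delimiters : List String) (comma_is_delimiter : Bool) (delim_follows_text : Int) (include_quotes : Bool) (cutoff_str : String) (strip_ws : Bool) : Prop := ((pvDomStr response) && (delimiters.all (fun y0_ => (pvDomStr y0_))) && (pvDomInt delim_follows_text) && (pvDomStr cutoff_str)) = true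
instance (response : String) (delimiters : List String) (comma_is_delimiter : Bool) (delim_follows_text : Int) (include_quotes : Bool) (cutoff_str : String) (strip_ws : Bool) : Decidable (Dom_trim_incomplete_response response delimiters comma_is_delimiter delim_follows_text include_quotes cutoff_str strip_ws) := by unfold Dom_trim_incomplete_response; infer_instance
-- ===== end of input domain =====

-- B replaces A's backward scan-with-break by two staged passes that collect delimiter and
-- comma hit indices and compare their maxima; same cost, different decomposition.

-- ===== PORT A =====
-- `c in string.ascii_letters` — element membership of a single char; exact on the ASCII domain
def pvLetterA (c : Char) : Bool := PySem.Chars.isalpha c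

-- A's `while i > 0: i -= 1; …` loop, recursing downward on i; returns (final i, trimmed if a break fired)
def pvALoop (chars : List Char) (delimiters : List String) (comma_is_delimiter : Bool)
    (delim_follows_text : Int) (cutoff : List Char) : Nat → Nat × Option (List Char)
  | 0 => (0, none)
  | i + 1 =>
    let c := chars.getD i ' '
    if delimiters.contains (String.ofList [c]) then
      if delim_follows_text > 0 &&
          !((PySem.List.slice chars (some ((i : Int) - delim_follows_text)) (some (i : Int))).all pvLetterA) then
        pvALoop chars delimiters comma_is_delimiter delim_follows_text cutoff i
      else
        -- response[:i+1] with nonnegative bound = take (exact: PySem.List.slice_to_natCast)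
        (i, some (chars.take (i + 1)))
    else if c == ',' && comma_is_delimiter then
      (i, some (chars.take i ++ cutoff))
    else pvALoop chars delimiters comma_is_delimiter delim_follows_text cutoff i

def trim_incomplete_response (response : String) (delimiters : List String) (comma_is_delimiter : Bool) (delim_follows_text : Int) (include_quotes : Bool) (cutoff_str : String) (strip_ws : Bool) : String :=
  let chars := response.toList
  if delimiters.any (fun d => PySem.Chars.endswith chars d.toList) then
    String.ofList chars
  else
    -- `assert delim_follows_text < len(response)`: Python raises AssertionError otherwise; Pre_ excludes those inputs
    let r := pvALoop chars delimiters comma_is_delimiter delim_follows_text cutoff_str.toList chars.length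
    let trimmed := r.2.getD chars
    let trimmed :=
      if include_quotes then
        match PySem.List.pyGet? chars ((r.1 : Int) + 1) with
        | some c => if c == '\'' then trimmed ++ ['\''] else if c == '"' then trimmed ++ ['"'] else trimmed
        | none => trimmed  -- Python raises IndexError here; excluded by Pre_
      else trimmed
    let trimmed := if strip_ws then PySem.Chars.strip trimmed else trimmed
    String.ofList trimmed

-- ===== PORT B =====
-- Source B's `letters_before(i)` helper
def pvLettersBefore (chars : List Char) (delim_follows_text : Int) (i : Nat) : Bool :=
  decide (delim_follows_text ≤ 0) ||
    (PySem.List.slice chars (some ((i : Int) - delim_follows_text)) (some (i : Int))).all PySem.Chars.isalpha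

-- the delimiter-hit condition of Source B's first comprehension
def pvOkDelim (chars : List Char) (delimiters : List String) (delim_follows_text : Int) (i : Nat) : Bool :=
  delimiters.contains (String.ofList [chars.getD i ' ']) && pvLettersBefore chars delim_follows_text i

-- the comma-hit condition of Source B's second comprehension
def pvOkComma (chars : List Char) (delimiters : List String) (comma_is_delimiter : Bool) (i : Nat) : Bool :=
  chars.getD i ' ' == ',' && !(delimiters.contains (String.ofList [chars.getD i ' '])) && comma_is_delimiter

-- `max((i for i in range(n) if p(i)), default=-1)`
def pvMaxIdx (p : Nat → Bool) (n : Nat) : Int :=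
  ((List.range n).filter p).foldl (fun a i => max a (i : Int)) (-1)

def trim_incomplete_response_alt (response : String) (delimiters : List String) (comma_is_delimiter : Bool) (delim_follows_text : Int) (include_quotes : Bool) (cutoff_str : String) (strip_ws : Bool) : String :=
  let chars := response.toList
  if delimiters.any (fun d => PySem.Chars.endswith chars d.toList) then
    String.ofList chars
  else
    -- assert as in A; Pre_ excludes the AssertionError inputs
    let best_d := pvMaxIdx (pvOkDelim chars delimiters delim_follows_text) chars.length
    let best_c := pvMaxIdx (pvOkComma chars delimiters comma_is_delimiter) chars.length
    let p : Nat × List Char :=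
      if best_d > best_c then (best_d.toNat, chars.take (best_d.toNat + 1))
      else if best_c ≥ 0 then (best_c.toNat, chars.take best_c.toNat ++ cutoff_str.toList)
      else (0, chars)
    let trimmed :=
      if include_quotes then
        -- `nxt = response[last_i + 1]`; Python raises IndexError on the none case; excluded by Pre_
        match PySem.List.pyGet? chars ((p.1 : Int) + 1) with
        | some nxt => if nxt == '\'' then p.2 ++ ['\''] else if nxt == '"' then p.2 ++ ['"'] else p.2
        | none => p.2
      else p.2
    if strip_ws then String.ofList (PySem.Chars.strip trimmed) else String.ofList trimmed

-- ===== PRECONDITION & SPEC =====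
-- Pre_ excludes exactly the inputs where A raises: the AssertionError when
-- delim_follows_text ≥ len(response), and the IndexError of `response[i+1]` when
-- include_quotes and either len(response) ≤ 1 with no match or the last char is a
-- matching comma (B raises on the very same inputs).
def Pre_trim_incomplete_response (response : String) (delimiters : List String) (comma_is_delimiter : Bool) (delim_follows_text : Int) (include_quotes : Bool) (cutoff_str : String) (strip_ws : Bool) : Prop :=
  (delimiters.any (fun d => PySem.Str.endswith response d)) = true ∨
  (delim_follows_text < (response.toList.length : Int) ∧
   (include_quotes = true →
     2 ≤ response.toList.length ∧
     ¬(response.toList.getLast? = some ',' ∧ comma_is_delimiter = true)))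
instance (response : String) (delimiters : List String) (comma_is_delimiter : Bool) (delim_follows_text : Int) (include_quotes : Bool) (cutoff_str : String) (strip_ws : Bool) : Decidable (Pre_trim_incomplete_response response delimiters comma_is_delimiter delim_follows_text include_quotes cutoff_str strip_ws) := by unfold Pre_trim_incomplete_response; infer_instance

def pvWitness_trim_incomplete_response : String × List String × Bool × Int × Bool × String × Bool :=
  ("hello, wor", [".", "!", "?"], true, 0, true, "...", true)

def Spec_trim_incomplete_response (response : String) (delimiters : List String) (comma_is_delimiter : Bool) (delim_follows_text : Int) (include_quotes : Bool) (cutoff_str : String) (strip_ws : Bool) (out : String) : Prop := out = trim_incomplete_response_alt response delimiters comma_is_delimiter delim_follows_text include_quotes cutoff_str strip_ws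
instance (response : String) (delimiters : List String) (comma_is_delimiter : Bool) (delim_follows_text : Int) (include_quotes : Bool) (cutoff_str : String) (strip_ws : Bool) (out : String) : Decidable (Spec_trim_incomplete_response response delimiters comma_is_delimiter delim_follows_text include_quotes cutoff_str strip_ws out) := by unfold Spec_trim_incomplete_response; infer_instance

-- ===== CLAIM (what is proved, stated in full; the proofs are below) =====
def Claim_equal_trim_incomplete_response : Prop := ∀ (response : String) (delimiters : List String) (comma_is_delimiter : Bool) (delim_follows_text : Int) (include_quotes : Bool) (cutoff_str : String) (strip_ws : Bool), Dom_trim_incomplete_response response delimiters comma_is_delimiter delim_follows_text include_quotes cutoff_str strip_ws → Pre_trim_incomplete_response response delimiters comma_is_delimiter delim_follows_text include_quotes cutoff_str strip_ws → Spec_trim_incomplete_response response delimiters comma_is_delimiter delim_follows_text include_quotes cutoff_str strip_ws (trim_incomplete_response response delimiters comma_is_delimiter delim_follows_text include_quotes cutoff_str strip_ws)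

-- ===== LEMMAS AND PROOFS =====

-- the match kind both programs test at a position: some true = delimiter hit, some false = comma hit
def pvKindI (chars : List Char) (delimiters : List String) (comma_is_delimiter : Bool)
    (delim_follows_text : Int) (i : Int) (c : Char) : Option Bool :=
  if delimiters.contains (String.ofList [c]) then
    if delim_follows_text > 0 &&
        !((PySem.List.slice chars (some (i - delim_follows_text)) (some i)).all PySem.Chars.isalpha) then none
    else some true
  else if c == ',' && comma_is_delimiter then some false
  else none

-- the highest matching index below n, as A's downward search finds it
def pvFind (chars : List Char) (delimiters : List String) (comma_is_delimiter : Bool)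
    (delim_follows_text : Int) : Nat → Option (Nat × Bool)
  | 0 => none
  | i + 1 =>
    match pvKindI chars delimiters comma_is_delimiter delim_follows_text i (chars.getD i ' ') with
    | some b => some (i, b)
    | none => pvFind chars delimiters comma_is_delimiter delim_follows_text i

theorem pvALoop_eq (chars : List Char) (delimiters : List String) (cid : Bool) (dft : Int)
    (cutoff : List Char) (n : Nat) :
    pvALoop chars delimiters cid dft cutoff n =
      match pvFind chars delimiters cid dft n with
      | some (i, true) => (i, some (chars.take (i + 1)))
      | some (i, false) => (i, some (chars.take i ++ cutoff))
      | none => (0, none) := by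
  induction n with
  | zero => rfl
  | succ i ih =>
    have hL : pvLetterA = PySem.Chars.isalpha := funext fun _ => rfl
    simp only [pvALoop, pvFind, pvKindI, hL]
    split_ifs with h1 h2 <;> simp_all

-- the per-index conditions of B's two comprehensions, expressed through pvKindI
theorem pvKind_split (chars : List Char) (delimiters : List String) (cid : Bool) (dft : Int) (i : Nat) :
    pvKindI chars delimiters cid dft (i : Int) (chars.getD i ' ') =
      (if pvOkDelim chars delimiters dft i then some true
       else if pvOkComma chars delimiters cid i then some false else none) := by
  simp only [pvKindI, pvOkDelim, pvOkComma, pvLettersBefore]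
  by_cases hcont : delimiters.contains (String.ofList [chars.getD i ' ']) = true
  · simp only [hcont]
    simp only [Bool.true_and, Bool.not_true, Bool.and_false, if_true]
    by_cases hall : (PySem.List.slice chars (some ((i : Int) - dft)) (some (i : Int))).all PySem.Chars.isalpha = true
    · simp only [hall]
      simp
    · rw [Bool.not_eq_true] at hall
      simp only [hall]
      by_cases hgt : dft > 0
      · have h1 : decide (dft ≤ 0) = false := by simp; omega
        have h2 : decide (dft > 0) = true := by simp [hgt]
        simp [h1, h2]
      · have h1 : decide (dft ≤ 0) = true := by simp; omega
        have h2 : decide (dft > 0) = false := by simp; omega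
        simp [h1, h2]
  · rw [Bool.not_eq_true] at hcont
    simp only [hcont]
    simp

theorem pvMaxIdx_succ (p : Nat → Bool) (n : Nat) :
    pvMaxIdx p (n + 1) = if p n then max (pvMaxIdx p n) (n : Int) else pvMaxIdx p n := by
  by_cases h : p n <;>
    simp [pvMaxIdx, List.range_succ, List.filter_append, List.foldl_append, h]

theorem pvMaxIdx_lt (p : Nat → Bool) : ∀ n, pvMaxIdx p n < (n : Int) := by
  intro n
  induction n with
  | zero => simp [pvMaxIdx]
  | succ n ih =>
    rw [pvMaxIdx_succ]
    by_cases h : p n <;> simp [h] <;> push_cast <;> omega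

-- A's backward search result, characterised by B's two maxima
theorem pvSel (chars : List Char) (delimiters : List String) (cid : Bool) (dft : Int) :
    ∀ n, pvFind chars delimiters cid dft n =
      (if pvMaxIdx (pvOkDelim chars delimiters dft) n > pvMaxIdx (pvOkComma chars delimiters cid) n then
         some ((pvMaxIdx (pvOkDelim chars delimiters dft) n).toNat, true)
       else if pvMaxIdx (pvOkComma chars delimiters cid) n ≥ 0 then
         some ((pvMaxIdx (pvOkComma chars delimiters cid) n).toNat, false)
       else none) := by
  intro n
  induction n with
  | zero => simp [pvFind, pvMaxIdx]
  | succ n ih =>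
    have hdlt := pvMaxIdx_lt (pvOkDelim chars delimiters dft) n
    have hclt := pvMaxIdx_lt (pvOkComma chars delimiters cid) n
    simp only [pvFind, pvKind_split, pvMaxIdx_succ]
    by_cases hd : pvOkDelim chars delimiters dft n
    · have h1 : max (pvMaxIdx (pvOkDelim chars delimiters dft) n) (n : Int) = (n : Int) := by omega
      have hd1 : delimiters.contains (String.ofList [chars.getD n ' ']) = true := by
        have h := hd
        simp only [pvOkDelim, Bool.and_eq_true] at h
        exact h.1
      have h2 : pvOkComma chars delimiters cid n = false := by
        simp only [pvOkComma]
        rw [hd1]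
        simp
      simp only [hd, h2, if_true, Bool.false_eq_true, if_false, h1]
      have h3 : (n : Int) > pvMaxIdx (pvOkComma chars delimiters cid) n := hclt
      simp [h3]
    · by_cases hc : pvOkComma chars delimiters cid n
      · have h1 : max (pvMaxIdx (pvOkComma chars delimiters cid) n) (n : Int) = (n : Int) := by omega
        have h2 : ¬ pvMaxIdx (pvOkDelim chars delimiters dft) n > (n : Int) := by omega
        have h3 : (0 : Int) ≤ (n : Int) := by omega
        simp [hd, hc, h1, h2, h3]
      · simp only [hd, hc, Bool.false_eq_true, if_false]
        exact ih

-- ===== VERDICT (by name: the statement is the Claim_ definition above) =====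
theorem trim_incomplete_response_spec : Claim_equal_trim_incomplete_response := by
  intro response delimiters cid dft iq cutoff sw _ _
  show _ = _
  simp only [trim_incomplete_response, trim_incomplete_response_alt]
  by_cases hE : delimiters.any (fun d => PySem.Chars.endswith response.toList d.toList) = true
  · simp only [hE, if_true]
  · simp only [hE, Bool.not_eq_true] at *
    simp only [Bool.false_eq_true, if_false]
    rw [pvALoop_eq]
    rw [show pvFind response.toList delimiters cid dft response.toList.length =
      (if pvMaxIdx (pvOkDelim response.toList delimiters dft) response.toList.length >
            pvMaxIdx (pvOkComma response.toList delimiters cid) response.toList.length then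
         some ((pvMaxIdx (pvOkDelim response.toList delimiters dft) response.toList.length).toNat, true)
       else if pvMaxIdx (pvOkComma response.toList delimiters cid) response.toList.length ≥ 0 then
         some ((pvMaxIdx (pvOkComma response.toList delimiters cid) response.toList.length).toNat, false)
       else none) from pvSel response.toList delimiters cid dft response.toList.length]
    split_ifs with h1 h2 <;> simp
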